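-- pv_equiv track=rewrite | github.com/Julien-Devos/LINFO1101-Intro-programmation | Session 07/Création de dictionnaire des valeurs maximums.py | create_dict_max
-- ===== SOURCE A (Python) =====
-- def create_dict_max(l):
--     d = {}
--     for x,y in l:
--         if x not in d:
--             d[x] = y
--         else:
--             if d[x] < y:
--                 d[x] = y
--     return d
-- ===== SOURCE B (Python) =====
-- def create_dict_max(l):
--     # Two-pass decomposition: group all values per key, then reduce each group with max.
--     groups = {}
--     for x, y in l:
--         groups.setdefault(x, []).append(y)
--     d = {}
--     for x, ys in groups.items():
--         d[x] = max(ys)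
--     return d
-- ===== Notes on version B (the rewrite author's own statement) =====
-- stated objective: alternative
-- what changed: Instead of keeping a running maximum per key in one pass, B first groups all values into lists per key (setdefault+append) and then builds the result in a second pass by taking max of each group, in the same first-appearance key order.
import Mathlib
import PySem

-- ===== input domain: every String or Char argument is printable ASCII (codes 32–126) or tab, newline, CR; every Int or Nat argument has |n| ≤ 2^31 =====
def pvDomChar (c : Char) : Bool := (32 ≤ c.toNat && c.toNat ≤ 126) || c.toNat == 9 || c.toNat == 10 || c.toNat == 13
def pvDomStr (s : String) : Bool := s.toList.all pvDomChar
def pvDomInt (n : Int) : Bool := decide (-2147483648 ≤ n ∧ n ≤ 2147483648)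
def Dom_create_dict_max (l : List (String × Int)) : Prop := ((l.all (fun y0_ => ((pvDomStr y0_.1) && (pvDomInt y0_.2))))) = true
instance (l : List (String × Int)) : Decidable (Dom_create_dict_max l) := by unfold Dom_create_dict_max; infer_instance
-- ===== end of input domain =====

-- B replaces A's single-pass running maximum by a two-pass grouping (per-key value lists, then max of each group); alternative decomposition, same cost.


-- ===== PORT A =====
-- for x,y in l: if x not in d: d[x] = y elif d[x] < y: d[x] = y
def create_dict_max (l : List (String × Int)) : List (String × Int) :=
  (l.foldl
    (fun (d : PySem.Dict String Int) p =>
      if d.contains p.1 = false then d.insert p.1 p.2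
      else if d.getD p.1 0 < p.2 then d.insert p.1 p.2 else d)
    PySem.Dict.empty).items

-- ===== PORT B =====
-- pass 1: groups.setdefault(x, []).append(y)  =  modify x [] (· ++ [y])
-- pass 2: d[x] = max(ys) for (x, ys) in groups.items(); ys is never empty here, so the
-- .getD 0 default of max? is unreachable and the port is exact.
def create_dict_max_alt (l : List (String × Int)) : List (String × Int) :=
  let groups : PySem.Dict String (List Int) :=
    l.foldl (fun g p => g.modify p.1 [] (fun vs => vs ++ [p.2])) PySem.Dict.empty
  (groups.items.foldl
    (fun (d : PySem.Dict String Int) p => d.insert p.1 ((PySem.List.max? p.2 id).getD 0))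
    PySem.Dict.empty).items

-- ===== PRECONDITION & SPEC =====
def Spec_create_dict_max (l : List (String × Int)) (out : List (String × Int)) : Prop := out = create_dict_max_alt l
instance (l : List (String × Int)) (out : List (String × Int)) : Decidable (Spec_create_dict_max l out) := by unfold Spec_create_dict_max; infer_instance

-- ===== CLAIM (what is proved, stated in full; the proofs are below) =====
def Claim_equal_create_dict_max : Prop := ∀ (l : List (String × Int)), Dom_create_dict_max l → Spec_create_dict_max l (create_dict_max l)

-- ===== LEMMAS AND PROOFS =====

-- A's loop body, named for the lemmas below
def pvStepA (d : PySem.Dict String Int) (p : String × Int) : PySem.Dict String Int :=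
  if d.contains p.1 = false then d.insert p.1 p.2
  else if d.getD p.1 0 < p.2 then d.insert p.1 p.2 else d

-- the folder of PySem.List.max? with key = id, specialised to Int
def pvMaxStep (o : Option Int) (y : Int) : Option Int :=
  match o with
  | none => some y
  | some m => if m < y then some y else some m

theorem pvStepA_eq (d : PySem.Dict String Int) (p : String × Int) :
    (fun (d : PySem.Dict String Int) p =>
      if d.contains p.1 = false then d.insert p.1 p.2
      else if d.getD p.1 0 < p.2 then d.insert p.1 p.2 else d) d p = pvStepA d p := rfl

theorem pvKeysA (l : List (String × Int)) (d : PySem.Dict String Int) :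
    (l.foldl pvStepA d).keys = PySem.Set.update d.keys (l.map (·.1)) := by
  induction l generalizing d with
  | nil => rfl
  | cons p l ih =>
      simp only [List.foldl_cons, List.map_cons, PySem.Set.update]
      rw [ih]
      congr 1
      show (pvStepA d p).keys = PySem.Set.add d.keys p.1
      unfold pvStepA PySem.Set.add
      by_cases h : p.1 ∈ d.keys
      · have hc : d.contains p.1 = true := by
          rw [PySem.Dict.contains_eq_decide_mem_keys]; simpa
        by_cases hlt : d.getD p.1 0 < p.2 <;>
          simp [h, hc, hlt, PySem.Dict.keys_insert_of_contains _ _ hc]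
      · have hc : d.contains p.1 = false := by
          rw [PySem.Dict.contains_eq_decide_mem_keys]; simpa
        simp [h, hc, PySem.Dict.keys_insert_of_not_contains _ _ hc]

theorem pvGetA (l : List (String × Int)) (d : PySem.Dict String Int) (k : String) :
    (l.foldl pvStepA d).get? k
      = l.foldl (fun o p => if p.1 = k then pvMaxStep o p.2 else o) (d.get? k) := by
  induction l generalizing d with
  | nil => rfl
  | cons p l ih =>
      simp only [List.foldl_cons]
      rw [ih]
      congr 1
      show (pvStepA d p).get? k = if p.1 = k then pvMaxStep (d.get? k) p.2 else d.get? k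
      unfold pvStepA
      rcases hg : d.get? p.1 with _ | m
      · have hc : d.contains p.1 = false := by
          rw [PySem.Dict.contains_eq_isSome_get?, hg]; rfl
        by_cases hk : p.1 = k
        · subst hk; simp [hc, hg, pvMaxStep]
        · simp [hc, PySem.Dict.get?_insert, hk, Ne.symm hk]
      · have hc : d.contains p.1 = true := by
          rw [PySem.Dict.contains_eq_isSome_get?, hg]; rfl
        have hgd : d.getD p.1 0 = m := by rw [PySem.Dict.getD_eq_get?_getD, hg]; rfl
        by_cases hk : p.1 = k
        · subst hk
          by_cases hlt : m < p.2
          · simp [hc, hgd, hlt, hg, pvMaxStep]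
          · simp [hc, hgd, hlt, hg, pvMaxStep]
        · by_cases hlt : m < p.2
          · simp [hc, hgd, hlt, PySem.Dict.get?_insert, hk, Ne.symm hk]
          · simp [hc, hgd, hlt, hk]

-- folding pvMaxStep over only the pairs with key k = folding it over the filtered values
theorem pvFilterFold (l : List (String × Int)) (k : String) (o : Option Int) :
    l.foldl (fun o p => if p.1 = k then pvMaxStep o p.2 else o) o
      = ((l.filter (fun p => p.1 == k)).map (·.2)).foldl pvMaxStep o := by
  induction l generalizing o with
  | nil => rfl
  | cons p l ih =>
      by_cases hk : p.1 = k
      · simp [hk, ih]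
      · simp [hk, ih]

theorem pvMax?_eq_foldl (xs : List Int) :
    PySem.List.max? xs id = xs.foldl pvMaxStep none := by
  unfold PySem.List.max?
  congr 1
  funext acc x
  cases acc <;> simp [pvMaxStep]

theorem create_dict_max_eq (l : List (String × Int)) :
    create_dict_max l = create_dict_max_alt l := by
  unfold create_dict_max create_dict_max_alt
  simp only [pvStepA_eq]
  have hA := pvKeysA l PySem.Dict.empty
  rw [PySem.Dict.keys_empty, PySem.Set.update_nil_left] at hA
  have hAnodup : (l.foldl pvStepA PySem.Dict.empty).keys.Nodup := by
    rw [hA]; exact PySem.Set.nodup_ofList _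
  -- groups side
  set groups : PySem.Dict String (List Int) :=
    l.foldl (fun g p => g.modify p.1 [] (fun vs => vs ++ [p.2])) PySem.Dict.empty with hgroups
  have hGkeys : groups.keys = PySem.Set.ofList (l.map (·.1)) := by
    rw [hgroups]
    rw [PySem.Dict.keys_foldl_modify_key l (·.1) [] (fun _ p vs => vs ++ [p.2]) PySem.Dict.empty]
    rw [PySem.Dict.keys_empty, PySem.Set.update_nil_left]
  have hGnodup : groups.keys.Nodup := by rw [hGkeys]; exact PySem.Set.nodup_ofList _
  have hGget : ∀ k, groups.getD k [] = (l.filter (fun p => p.1 == k)).map (·.2) := by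
    intro k
    rw [hgroups, PySem.Dict.getD_foldl_modify_append l PySem.Dict.empty k]
    simp [PySem.Dict.getD_empty]
  -- B's second loop appends fresh distinct keys
  have hfresh : ∀ a ∈ groups.items, (PySem.Dict.empty : PySem.Dict String Int).contains a.1 = false :=
    fun a _ => PySem.Dict.contains_empty _
  have hmapnodup : (groups.items.map (·.1)).Nodup := hGnodup
  rw [PySem.Dict.items_foldl_insert_fresh groups.items (·.1)
        (fun p => (PySem.List.max? p.2 id).getD 0) PySem.Dict.empty hfresh hmapnodup]
  rw [PySem.Dict.items_eq_map_keys groups hGnodup []]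
  rw [PySem.Dict.items_eq_map_keys _ hAnodup 0]
  have hie : (PySem.Dict.empty : PySem.Dict String Int).items = [] := rfl
  simp only [hie, List.nil_append, List.map_map, hA, hGkeys]
  apply List.map_congr_left
  intro k _
  simp only [Function.comp]
  congr 1
  rw [PySem.Dict.getD_eq_get?_getD, pvGetA, PySem.Dict.get?_empty, pvFilterFold,
      hGget, pvMax?_eq_foldl]

-- ===== VERDICT (by name: the statement is the Claim_ definition above) =====
theorem create_dict_max_spec : Claim_equal_create_dict_max := by
  intro l _
  unfold Spec_create_dict_max
  exact create_dict_max_eq l
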